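-- pv_equiv track=rewrite | github.com/ariel8sche/ComputerScience | intro/python/guia8.py | posPar2
-- ===== SOURCE A (Python) =====
-- def posPar2(l:list([int]))->list:
--     listaModificada:list = []
--     for pos in range(0, len(l)-1, 1):
--         if (pos % 2 != 0):
--             listaModificada.append(0)
--         else:
--             listaModificada.append(l[pos])
--     return listaModificada
-- ===== SOURCE B (Python) =====
-- def posPar2(l:list([int]))->list:
--     r = l[:-1]
--     r[1::2] = [0] * len(r[1::2])
--     return r
-- ===== Notes on version B (the rewrite author's own statement) =====
-- stated objective: idiomatic
-- what changed: Replaces the per-element index loop with an if/else branch by a copy of l[:-1] followed by a bulk strided slice assignment zeroing the odd positions.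
import Mathlib
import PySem

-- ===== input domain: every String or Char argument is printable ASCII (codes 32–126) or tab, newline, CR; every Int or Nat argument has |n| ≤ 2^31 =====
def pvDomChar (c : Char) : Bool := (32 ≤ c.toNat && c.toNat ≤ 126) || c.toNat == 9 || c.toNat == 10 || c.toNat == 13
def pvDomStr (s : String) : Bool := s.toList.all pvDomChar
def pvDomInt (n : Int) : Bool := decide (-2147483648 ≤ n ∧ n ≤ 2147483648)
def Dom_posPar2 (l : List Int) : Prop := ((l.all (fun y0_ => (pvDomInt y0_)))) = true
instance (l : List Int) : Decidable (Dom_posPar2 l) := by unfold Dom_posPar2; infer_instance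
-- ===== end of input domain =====

-- B copies l[:-1] and zeroes the odd positions by a bulk strided slice assignment,
-- instead of A's per-element index loop with an if/else branch. Return value only; neither mutates its input.

-- ===== PORT A =====
-- for pos in range(0, len(l)-1, 1): append 0 if pos odd else l[pos]
-- (pos is always a valid index, so l[pos] is ported as pyGetD with default 0)
def posPar2 (l : List Int) : List Int :=
  (PySem.List.pyRange 0 ((l.length : Int) - 1) 1).foldl
    (fun acc pos => acc ++ [if pos % 2 ≠ 0 then 0 else PySem.List.pyGetD l pos 0]) []

-- ===== PORT B =====
-- r[1::2] = [0] * len(r[1::2]) : hand port of the strided overwrite, exact —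
-- it rebuilds r keeping even positions and writing 0 at every odd position, two cells at a time.
def zeroOddStride : List Int → List Int
  | [] => []
  | [x] => [x]
  | x :: _ :: rest => x :: 0 :: zeroOddStride rest

def posPar2_alt (l : List Int) : List Int :=
  zeroOddStride (PySem.List.slice l none (some (-1)))

-- ===== PRECONDITION & SPEC =====
def Spec_posPar2 (l : List Int) (out : List Int) : Prop := out = posPar2_alt l
instance (l : List Int) (out : List Int) : Decidable (Spec_posPar2 l out) := by unfold Spec_posPar2; infer_instance

-- ===== CLAIM (what is proved, stated in full; the proofs are below) =====
def Claim_equal_posPar2 : Prop := ∀ (l : List Int), Dom_posPar2 l → Spec_posPar2 l (posPar2 l)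

-- ===== LEMMAS AND PROOFS =====

-- A's loop, as a map over the Nat range
theorem posPar2_eq_map (l : List Int) :
    posPar2 l = (List.range (l.length - 1)).map
      (fun k => if k % 2 = 1 then 0 else l.getD k 0) := by
  unfold posPar2
  rw [PySem.List.foldl_append_eq_flatMap, PySem.List.pyRange_one]
  have hn : ((l.length : Int) - 1 - 0).toNat = l.length - 1 := by omega
  rw [hn]
  rw [List.nil_append, ← List.map_eq_flatMap, List.map_map]
  apply List.map_congr_left
  intro k hk
  simp only [Function.comp_apply, Int.zero_add]
  have hlt : k < l.length - 1 := List.mem_range.mp hk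
  by_cases h : k % 2 = 1
  · rw [if_pos (show (k : Int) % 2 ≠ 0 by omega), if_pos h]
  · rw [if_neg (show ¬ (k : Int) % 2 ≠ 0 by omega), if_neg h]
    rw [PySem.List.pyGetD_natCast]

-- B's strided-overwrite helper, as a map over the range of its argument
theorem zeroOddStride_eq_map (xs : List Int) :
    zeroOddStride xs = (List.range xs.length).map
      (fun k => if k % 2 = 1 then 0 else xs.getD k 0) := by
  induction xs using zeroOddStride.induct with
  | case1 => simp [zeroOddStride]
  | case2 x => simp [zeroOddStride, List.range_succ]
  | case3 x y rest ih =>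
    simp only [zeroOddStride, ih, List.length_cons]
    have hsplit : List.range (rest.length + 1 + 1) =
        0 :: 1 :: (List.range rest.length).map (fun k => k + 2) := by
      rw [show rest.length + 1 + 1 = 2 + rest.length by omega, List.range_add]
      simp [List.range_succ]
      exact fun a _ => by omega
    rw [hsplit, List.map_cons, List.map_cons, List.map_map]
    refine congrArg₂ _ ?_ (congrArg₂ _ ?_ ?_)
    · norm_num [List.getD]
    · norm_num
    · apply List.map_congr_left
      intro k hk
      simp only [Function.comp_apply]
      by_cases h : k % 2 = 1
      · have h2 : (k + 2) % 2 = 1 := by omega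
        rw [if_pos h, if_pos h2]
      · have h2 : ¬ (k + 2) % 2 = 1 := by omega
        rw [if_neg h, if_neg h2, show k + 2 = k + 1 + 1 by omega]
        simp [List.getD]

theorem posPar2_verdict (l : List Int) : posPar2 l = posPar2_alt l := by
  rw [posPar2_eq_map]
  unfold posPar2_alt
  rw [PySem.List.slice_to_neg_one, zeroOddStride_eq_map]
  have hlen : l.dropLast.length = l.length - 1 := by simp
  rw [hlen]
  apply List.map_congr_left
  intro k hk
  have hlt : k < l.length - 1 := List.mem_range.mp hk
  by_cases h : k % 2 = 1
  · simp [h]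
  · simp only [h, if_false]
    have hk1 : k < l.dropLast.length := by rw [hlen]; omega
    have hk2 : k < l.length := by omega
    rw [List.getD_eq_getElem _ _ hk1, List.getD_eq_getElem _ _ hk2, List.getElem_dropLast]

-- ===== VERDICT (by name: the statement is the Claim_ definition above) =====
theorem posPar2_spec : Claim_equal_posPar2 := by
  intro l _
  exact posPar2_verdict l
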